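-- pv_equiv track=rewrite | github.com/Nama21yo/Natnael_CP | F_String_Game.py | solve
-- ===== SOURCE A (Python) =====
-- def can_delete(t, index_map, n, mid, p):
--     goal =  len(p)
--     idx = 0
--     for i in range(n):
--         if index_map[i] <= mid:
--             continue
--         elif idx < goal and t[i] == p[idx]:
--             idx += 1
--     return idx == goal
--
-- def solve(t,p, index_map, n):
--     l = -1
--     r = n + 1
--     while r - l > 1:
--         mid = l + (r - l)//2
--         # TTTTTTT T FFFFFFF patterns
--         if can_delete(t,index_map, n , mid, p):
--             l = mid
--         else:
--             r = mid
--     return l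
-- ===== SOURCE B (Python) =====
-- def _omin(a, x):
--     # min of an optional value and an int (None = "no embedding")
--     return None if a is None else min(a, x)
--
-- def _omax(a, b):
--     # max of two optional values (None = "no embedding")
--     if a is None:
--         return b
--     if b is None:
--         return a
--     return max(a, b)
--
-- def solve(t, p, index_map, n):
--     # Bottleneck DP instead of binary search: q[k] = the largest achievable
--     # minimum of min(n+1, index_map over chosen positions) over all embeddings
--     # of p[:k+1] into the first n characters of t (None if no embedding).
--     ps = list(p)
--     m = len(ps)
--     q = [None] * m
--     stop = max(0, n)
--     for c, x in zip(t[:stop], index_map[:stop]):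
--         prev = n + 1  # sentinel for the empty prefix (cap at n+1)
--         new = []
--         for k in range(m):
--             cur = q[k]
--             if c == ps[k]:
--                 cur = _omax(cur, _omin(prev, x))
--             new.append(cur)
--             prev = q[k]
--         q = new
--     last = (n + 1) if m == 0 else q[m - 1]
--     if last is None:
--         return -1
--     return max(-1, last - 1)
-- ===== Notes on version B (the rewrite author's own statement) =====
-- stated objective: alternative
-- what changed: Replaced the binary search over the deletion threshold (each probe re-running a greedy subsequence check) by a single left-to-right bottleneck DP that computes, for every prefix of p, the best achievable minimum index_map value over all embeddings, and reads the answer off the final DP cell.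
-- outside the precondition, e.g. on solve('', 'a', [0], 1): A returns -1, B returns -1
import Mathlib
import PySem

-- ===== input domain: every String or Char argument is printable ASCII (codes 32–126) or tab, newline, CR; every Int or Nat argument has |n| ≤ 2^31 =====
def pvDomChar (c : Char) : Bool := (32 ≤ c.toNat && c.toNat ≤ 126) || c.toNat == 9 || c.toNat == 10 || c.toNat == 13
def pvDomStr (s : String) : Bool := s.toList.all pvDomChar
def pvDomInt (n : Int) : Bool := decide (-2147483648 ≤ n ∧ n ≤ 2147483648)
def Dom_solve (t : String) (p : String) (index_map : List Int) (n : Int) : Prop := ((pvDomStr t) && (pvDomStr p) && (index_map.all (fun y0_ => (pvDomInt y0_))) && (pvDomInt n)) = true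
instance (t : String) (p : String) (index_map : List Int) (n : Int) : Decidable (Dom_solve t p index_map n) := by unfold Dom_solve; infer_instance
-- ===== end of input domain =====

-- B replaces A's binary search by a one-pass bottleneck DP (alternative decomposition, not claimed faster);
-- return values agree on all inputs admitted by Pre_solve.

-- ===== PORT A =====
-- helper can_delete: greedy check that p embeds into t restricted to positions with index_map[i] > mid
def canDelete (t : String) (index_map : List Int) (n : Int) (mid : Int) (p : String) : Bool :=
  let goal : Int := PySem.Str.len p
  let idx : Int := (PySem.List.pyRange 0 n 1).foldl (fun idx i =>
    if PySem.List.pyGetD index_map i 0 ≤ mid then idx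
    else if idx < goal ∧ (PySem.Str.pyGet? t i).getD ' ' = (PySem.Str.pyGet? p idx).getD ' ' then idx + 1
    else idx) 0
  decide (idx = goal)

-- the while-loop of solve, recursion on the shrinking bracket
def solveLoop (t : String) (p : String) (index_map : List Int) (n : Int) (l r : Int) : Int :=
  if _h : 1 < r - l then
    let mid := l + PySem.Int.floordiv (r - l) 2
    if canDelete t index_map n mid p then solveLoop t p index_map n mid r
    else solveLoop t p index_map n l mid
  else l
termination_by (r - l).toNat
decreasing_by
  · simp only [PySem.Int.floordiv_eq_ediv_of_pos (by omega : (0:Int) < 2)] at *; omega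
  · simp only [PySem.Int.floordiv_eq_ediv_of_pos (by omega : (0:Int) < 2)] at *; omega

def solve (t : String) (p : String) (index_map : List Int) (n : Int) : Int :=
  solveLoop t p index_map n (-1) (n + 1)

-- ===== PORT B =====
-- _omin of Source B
def omin (a : Option Int) (x : Int) : Option Int :=
  match a with
  | none => none
  | some v => some (min v x)

-- _omax of Source B
def omax (a b : Option Int) : Option Int :=
  match a, b with
  | none, b => b
  | some u, none => some u
  | some u, some w => some (max u w)

-- Source B's inner `for k in range(m)` loop: rebuild q, threading prev = old q[k-1]
def updB (c : Char) (x : Int) : Option Int → List Char → List (Option Int) → List (Option Int)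
  | prev, pc :: ps, cur :: rest =>
      (if c = pc then omax cur (omin prev x) else cur) :: updB c x cur ps rest
  | _, _, _ => []

def solve_alt (t : String) (p : String) (index_map : List Int) (n : Int) : Int :=
  let ps := p.toList
  let m := ps.length
  let q0 : List (Option Int) := ps.map (fun _ => none)
  let stop : Int := max 0 n
  let L := List.zip (PySem.List.slice t.toList none (some stop))
                    (PySem.List.slice index_map none (some stop))
  let qf := L.foldl (fun q cx => updB cx.1 cx.2 (some (n + 1)) ps q) q0
  let last : Option Int := if m = 0 then some (n + 1) else PySem.List.pyGetD qf ((m : Int) - 1) none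
  match last with
  | none => -1
  | some v => max (-1) (v - 1)

-- ===== PRECONDITION & SPEC =====
-- Pre_ excludes inputs where n exceeds the length of index_map or (with nonempty p) of t: there A's
-- indexing in can_delete generally raises IndexError (it always does when n > len(index_map) and n ≥ 1);
-- on the rare such inputs where the greedy scan never reaches an out-of-range t index, A returns -1
-- without an embedding, and B returns -1 there too (see the cited example).
def Pre_solve (t : String) (p : String) (index_map : List Int) (n : Int) : Prop :=
  n ≤ 0 ∨ (n ≤ (index_map.length : Int) ∧ (n ≤ (t.toList.length : Int) ∨ p = ""))
instance (t : String) (p : String) (index_map : List Int) (n : Int) : Decidable (Pre_solve t p index_map n) := by unfold Pre_solve; infer_instance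

def pvWitness_solve : String × String × List Int × Int := ("abcab", "bb", [2, 1, 3, 1, 2], 5)

def Spec_solve (t : String) (p : String) (index_map : List Int) (n : Int) (out : Int) : Prop := out = solve_alt t p index_map n
instance (t : String) (p : String) (index_map : List Int) (n : Int) (out : Int) : Decidable (Spec_solve t p index_map n out) := by unfold Spec_solve; infer_instance

-- ===== CLAIM (what is proved, stated in full; the proofs are below) =====
def Claim_equal_solve : Prop := ∀ (t : String) (p : String) (index_map : List Int) (n : Int), Dom_solve t p index_map n → Pre_solve t p index_map n → Spec_solve t p index_map n (solve t p index_map n)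

-- ===== LEMMAS AND PROOFS =====

-- the characters of t that survive deleting every position whose index_map value is ≤ mid
def kept (mid : Int) (L : List (Char × Int)) : List Char :=
  (L.filter (fun q => decide (mid < q.2))).map Prod.fst

-- "o is some value strictly above mid"
def PC (o : Option Int) (mid : Int) : Prop := ∃ v, o = some v ∧ mid < v

-- the body of can_delete's loop, expressed on a (char, index) pair
def gstep (p : String) (goal mid : Int) (idx : Int) (cx : Char × Int) : Int :=
  if cx.2 ≤ mid then idx
  else if idx < goal ∧ cx.1 = (PySem.Str.pyGet? p idx).getD ' ' then idx + 1
  else idx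

-- DP invariant: entry k of q characterises embeddability of pre ++ p[:k+1] into kept mid L
def DPInv (n : Int) (L : List (Char × Int)) : List Char → List Char → List (Option Int) → Prop
  | _pre, [], [] => True
  | pre, pc :: ps', o :: q' =>
      (∀ mid : Int, mid ≤ n → ((pre ++ [pc]).Sublist (kept mid L) ↔ PC o mid)) ∧
      DPInv n L (pre ++ [pc]) ps' q'
  | _, _, _ => False

-- ---- small facts about kept ----
lemma kept_nil (mid : Int) : kept mid [] = [] := rfl

lemma kept_cons_le {mid x : Int} (c : Char) (L : List (Char × Int)) (h : x ≤ mid) :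
    kept mid ((c, x) :: L) = kept mid L := by
  simp [kept, show ¬ mid < x by omega]

lemma kept_cons_gt {mid x : Int} (c : Char) (L : List (Char × Int)) (h : mid < x) :
    kept mid ((c, x) :: L) = c :: kept mid L := by
  simp [kept, h]

lemma kept_append (mid x : Int) (c : Char) (L : List (Char × Int)) :
    kept mid (L ++ [(c, x)]) = kept mid L ++ (if mid < x then [c] else []) := by
  by_cases h : mid < x <;> simp [kept, List.filter_append, h]

-- ---- small facts about PC / omin / omax ----
lemma PC_none (mid : Int) : ¬ PC none mid := by simp [PC]

lemma PC_some (v mid : Int) : PC (some v) mid ↔ mid < v := by simp [PC]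

lemma PC_omin (a : Option Int) (x mid : Int) : PC (omin a x) mid ↔ PC a mid ∧ mid < x := by
  cases a <;> simp [omin, PC]

lemma PC_omax (a b : Option Int) (mid : Int) : PC (omax a b) mid ↔ PC a mid ∨ PC b mid := by
  cases a <;> cases b <;> simp [omax, PC]

-- ---- sublist facts ----
lemma snoc_sublist_snoc (pre s : List Char) (d c : Char) :
    (pre ++ [d]).Sublist (s ++ [c]) ↔ (pre ++ [d]).Sublist s ∨ (d = c ∧ pre.Sublist s) := by
  rw [List.sublist_append_iff]
  constructor
  · rintro ⟨l₁, l₂, heq, h1, h2⟩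
    rcases List.sublist_singleton.mp h2 with h | h
    · subst h; left; rw [List.append_nil] at heq; exact heq ▸ h1
    · subst h
      obtain ⟨rfl, hdc⟩ := List.append_inj' heq rfl
      right; exact ⟨by simpa using hdc, h1⟩
  · rintro (h | ⟨rfl, h⟩)
    · exact ⟨pre ++ [d], [], by simp, h, by simp⟩
    · exact ⟨pre, [d], rfl, h, by simp⟩

lemma cons_sublist_cons_of_ne {a b : Char} {l s : List Char} (hne : a ≠ b) :
    (a :: l).Sublist (b :: s) ↔ (a :: l).Sublist s := by
  rw [List.cons_sublist_cons']
  simp [hne]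

-- ---- greedy loop of can_delete vs Sublist ----
lemma pget_char (p : String) (idx : Int) (h0 : 0 ≤ idx) (h1 : idx.toNat < p.toList.length) :
    (PySem.Str.pyGet? p idx).getD ' ' = p.toList[idx.toNat] := by
  simp only [PySem.Str.pyGet?, PySem.Chars.pyGet?]
  rw [PySem.List.pyGet?_eq_some_getElem _ h0 (by omega)]
  rfl

lemma gfold_spec (p : String) (mid : Int) :
    ∀ (L : List (Char × Int)) (idx : Int), 0 ≤ idx → idx ≤ (p.toList.length : Int) →
      (L.foldl (gstep p (PySem.Str.len p) mid) idx = (p.toList.length : Int) ↔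
        (p.toList.drop idx.toNat).Sublist (kept mid L)) := by
  intro L
  induction L with
  | nil =>
    intro idx h0 h1
    simp only [List.foldl_nil, kept_nil, List.sublist_nil, List.drop_eq_nil_iff]
    omega
  | cons e L ih =>
    obtain ⟨c, x⟩ := e
    intro idx h0 h1
    simp only [List.foldl_cons]
    by_cases hx : x ≤ mid
    · rw [kept_cons_le c L (by omega), show gstep p (PySem.Str.len p) mid idx (c, x) = idx by
        simp [gstep, hx]]
      exact ih idx h0 h1
    · rw [kept_cons_gt c L (by omega)]
      by_cases hlt : idx < (p.toList.length : Int)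
      · have hidx : idx.toNat < p.toList.length := by omega
        have hdrop : p.toList.drop idx.toNat = p.toList[idx.toNat] :: p.toList.drop (idx.toNat + 1) :=
          List.drop_eq_getElem_cons hidx
        by_cases hc : c = p.toList[idx.toNat]
        · rw [show gstep p (PySem.Str.len p) mid idx (c, x) = idx + 1 by
            unfold gstep
            rw [if_neg hx, if_pos ⟨by rw [PySem.Str.len_eq]; exact_mod_cast hlt,
              by rw [pget_char p idx h0 hidx]; exact hc⟩]]
          rw [ih (idx + 1) (by omega) (by omega), hdrop, ← hc]
          rw [show (idx + 1).toNat = idx.toNat + 1 by omega]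
          exact (List.cons_sublist_cons).symm
        · rw [show gstep p (PySem.Str.len p) mid idx (c, x) = idx by
            unfold gstep
            rw [if_neg hx, if_neg]
            rintro ⟨-, hcc⟩
            exact hc (by rw [pget_char p idx h0 hidx] at hcc; exact hcc)]
          rw [ih idx h0 h1, hdrop, cons_sublist_cons_of_ne (fun h => hc h.symm), ← hdrop]
      · have hidx : idx = (p.toList.length : Int) := by omega
        rw [show gstep p (PySem.Str.len p) mid idx (c, x) = idx by
          unfold gstep
          rw [if_neg hx, if_neg]
          rintro ⟨hlt', -⟩
          rw [PySem.Str.len_eq] at hlt'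
          omega]
        rw [ih idx h0 h1]
        rw [show p.toList.drop idx.toNat = [] by
          rw [List.drop_eq_nil_iff]; omega]
        simp

-- ---- bridge: can_delete's indexed loop equals the zipped fold ----
lemma fold_range_zip (t : String) (p : String) (im : List Int) (mid : Int) :
    ∀ (N : Nat), N ≤ t.toList.length → N ≤ im.length → ∀ idx : Int,
      (List.range N).foldl (fun idx (k : Nat) =>
        (fun (idx : Int) (i : Int) =>
          if PySem.List.pyGetD im i 0 ≤ mid then idx
          else if idx < PySem.Str.len p ∧ (PySem.Str.pyGet? t i).getD ' ' = (PySem.Str.pyGet? p idx).getD ' ' then idx + 1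
          else idx) idx ((0 : Int) + (k : Int))) idx
      = ((t.toList.take N).zip (im.take N)).foldl (gstep p (PySem.Str.len p) mid) idx := by
  intro N
  induction N with
  | zero => intro _ _ idx; simp
  | succ N ih =>
    intro ht hi idx
    rw [List.range_succ, List.foldl_append]
    have htN : N < t.toList.length := by omega
    have hiN : N < im.length := by omega
    rw [List.take_add_one, List.take_add_one]
    rw [List.getElem?_eq_getElem htN, List.getElem?_eq_getElem hiN]
    rw [List.zip_append (by rw [List.length_take, List.length_take]; omega)]
    rw [List.foldl_append]
    rw [ih (by omega) (by omega) idx]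
    simp only [List.foldl_cons, List.foldl_nil, Option.toList_some, List.zip_cons_cons, List.zip_nil_right]
    have h1 : PySem.List.pyGetD im ((0 : Int) + (N : Int)) 0 = im[N] := by
      rw [zero_add, PySem.List.pyGetD_natCast, List.getD_eq_getElem _ _ hiN]
    have h2 : (PySem.Str.pyGet? t ((0 : Int) + (N : Int))).getD ' ' = t.toList[N] := by
      rw [zero_add]
      exact pget_char t (N : Int) (by omega) (by simpa using htN)
    have hstep : ∀ s : Int,
        (if PySem.List.pyGetD im ((0 : Int) + (N : Int)) 0 ≤ mid then s
         else if s < PySem.Str.len p ∧ (PySem.Str.pyGet? t ((0 : Int) + (N : Int))).getD ' ' = (PySem.Str.pyGet? p s).getD ' ' then s + 1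
         else s)
        = gstep p (PySem.Str.len p) mid s (t.toList[N], im[N]) := by
      intro s
      simp only [gstep, h1, h2]
    rw [hstep]

lemma canDelete_eq (t p : String) (im : List Int) (n mid : Int)
    (ht : n.toNat ≤ t.toList.length) (hi : n.toNat ≤ im.length) :
    canDelete t im n mid p =
      decide ((((t.toList.take n.toNat).zip (im.take n.toNat)).foldl
        (gstep p (PySem.Str.len p) mid) 0) = (p.toList.length : Int)) := by
  simp only [canDelete]
  rw [PySem.List.pyRange_one, List.foldl_map]
  rw [show (n - 0).toNat = n.toNat by omega]
  rw [fold_range_zip t p im mid n.toNat ht hi 0]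
  simp [PySem.Str.len_eq]

-- can_delete is always true for the empty pattern
lemma foldl_fix0 {A : Type} (f : Int → A → Int) (h : ∀ a, f 0 a = 0) :
    ∀ l : List A, l.foldl f 0 = 0 := by
  intro l
  induction l with
  | nil => rfl
  | cons a l ih => rw [List.foldl_cons, h]; exact ih

lemma canDelete_empty (t : String) (p : String) (im : List Int) (n mid : Int)
    (hp : p.toList = []) : canDelete t im n mid p = true := by
  have hgoal : PySem.Str.len p = 0 := by rw [PySem.Str.len_eq, hp]; rfl
  simp only [canDelete, hgoal]
  rw [decide_eq_true_eq]
  exact foldl_fix0 _ (by intro a; simp) _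

-- ---- the binary search reaches ans whenever feasibility is "mid ≤ ans" ----
lemma solveLoop_eq (t p : String) (im : List Int) (n ans : Int)
    (H : ∀ mid : Int, 0 ≤ mid → mid ≤ n → (canDelete t im n mid p = true ↔ mid ≤ ans)) :
    ∀ (k : Nat) (l r : Int), (r - l).toNat ≤ k → -1 ≤ l → l ≤ ans → ans < r → r ≤ n + 1 →
      solveLoop t p im n l r = ans := by
  intro k
  induction k with
  | zero => intro l r hk h1 h2 h3 h4; omega
  | succ k ih =>
    intro l r hk h1 h2 h3 h4
    rw [solveLoop]
    by_cases h : 1 < r - l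
    · rw [dif_pos h]
      have hfd : PySem.Int.floordiv (r - l) 2 = (r - l) / 2 :=
        PySem.Int.floordiv_eq_ediv_of_pos (by omega)
      have hmid1 : l < l + PySem.Int.floordiv (r - l) 2 := by rw [hfd]; omega
      have hmid2 : l + PySem.Int.floordiv (r - l) 2 < r := by rw [hfd]; omega
      by_cases hc : canDelete t im n (l + PySem.Int.floordiv (r - l) 2) p = true
      · simp only [hc, if_true]
        exact ih _ r (by omega) (by omega)
          ((H _ (by omega) (by omega)).mp hc) h3 h4
      · simp only [hc, Bool.false_eq_true, if_false]
        refine ih l _ (by omega) h1 h2 ?_ (by omega)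
        by_contra hcon
        exact hc ((H _ (by omega) (by omega)).mpr (by omega))
    · rw [dif_neg h]; omega

-- ---- DP machinery ----
lemma updB_len (c : Char) (x : Int) :
    ∀ (ps : List Char) (q : List (Option Int)) (prev : Option Int),
      ps.length = q.length → (updB c x prev ps q).length = q.length := by
  intro ps
  induction ps with
  | nil => intro q prev h; cases q with
    | nil => rfl
    | cons o q' => simp at h
  | cons pc ps' ih =>
    intro q prev h
    cases q with
    | nil => simp at h
    | cons o q' => simp only [updB, List.length_cons]; rw [ih q' o (by simpa using h)]

lemma foldq_len (n : Int) (ps : List Char) (L : List (Char × Int)) :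
    (L.foldl (fun q cx => updB cx.1 cx.2 (some (n + 1)) ps q) (ps.map fun _ => none)).length
      = ps.length := by
  induction L using List.reverseRecOn with
  | nil => simp
  | append_singleton L e ih =>
    rw [List.foldl_append]
    simp only [List.foldl_cons, List.foldl_nil]
    rw [updB_len e.1 e.2 ps _ (some (n + 1)) (by rw [ih]), ih]

def BndOk (n : Int) (q : List (Option Int)) : Prop :=
  ∀ o ∈ q, ∀ w : Int, o = some w → w ≤ n + 1

lemma updB_bnd (n : Int) (c : Char) (x : Int) :
    ∀ (ps : List Char) (q : List (Option Int)) (prev : Option Int),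
      BndOk n q → (∀ w : Int, prev = some w → w ≤ n + 1) →
      BndOk n (updB c x prev ps q) := by
  intro ps
  induction ps with
  | nil => intro q prev _ _ o ho; cases q <;> simp [updB] at ho
  | cons pc ps' ih =>
    intro q prev hq hprev
    cases q with
    | nil => intro o ho; simp [updB] at ho
    | cons o q' =>
      have hq_head : ∀ w : Int, o = some w → w ≤ n + 1 := fun w hw => hq o (by simp) w hw
      have hq_tail : BndOk n q' := fun a ha w hw => hq a (by simp [ha]) w hw
      intro o' ho' w hw
      simp only [updB, List.mem_cons] at ho'
      rcases ho' with h | h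
      · have hw2 : (if c = pc then omax o (omin prev x) else o) = some w := by rw [← h]; exact hw
        by_cases hc : c = pc
        · rw [if_pos hc] at hw2
          cases o with
          | none =>
            cases prev with
            | none => simp [omax, omin] at hw2
            | some pv =>
              simp [omax, omin] at hw2
              have := hprev pv rfl
              omega
          | some ov =>
            cases prev with
            | none =>
              simp [omax, omin] at hw2
              have := hq_head ov rfl
              omega
            | some pv =>
              simp [omax, omin] at hw2
              have h1 := hq_head ov rfl
              have h2 := hprev pv rfl
              omega
        · rw [if_neg hc] at hw2
          exact hq_head w hw2
      · exact ih q' o hq_tail hq_head o' h w hw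

lemma foldq_bnd (n : Int) (ps : List Char) (L : List (Char × Int)) :
    BndOk n (L.foldl (fun q cx => updB cx.1 cx.2 (some (n + 1)) ps q) (ps.map fun _ => none)) := by
  induction L using List.reverseRecOn with
  | nil => intro o ho w hw; simp [hw] at ho
  | append_singleton L e ih =>
    rw [List.foldl_append]
    simp only [List.foldl_cons, List.foldl_nil]
    exact updB_bnd n e.1 e.2 ps _ (some (n + 1)) ih (fun w hw => by simp at hw; omega)

lemma DPInv_init (n : Int) : ∀ (ps : List Char) (pre : List Char),
    DPInv n [] pre ps (ps.map fun _ => none) := by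
  intro ps
  induction ps with
  | nil => intro pre; trivial
  | cons pc ps' ih =>
    intro pre
    refine ⟨?_, ih (pre ++ [pc])⟩
    intro mid _
    rw [kept_nil]
    simp [PC]

lemma DPInv_step (n : Int) (L : List (Char × Int)) (c : Char) (x : Int) :
    ∀ (ps : List Char) (q : List (Option Int)) (pre : List Char) (prev : Option Int),
      DPInv n L pre ps q →
      (∀ mid : Int, mid ≤ n → (pre.Sublist (kept mid L) ↔ PC prev mid)) →
      DPInv n (L ++ [(c, x)]) pre ps (updB c x prev ps q) := by
  intro ps
  induction ps with
  | nil =>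
    intro q pre prev hInv _
    cases q with
    | nil => trivial
    | cons o q' => exact absurd hInv (by simp [DPInv])
  | cons pc ps' ih =>
    intro q pre prev hInv hprev
    cases q with
    | nil => exact absurd hInv (by simp [DPInv])
    | cons o q' =>
      obtain ⟨hH, hT⟩ := hInv
      refine ⟨?_, ih q' (pre ++ [pc]) o hT hH⟩
      intro mid hm
      rw [kept_append]
      by_cases hx : mid < x
      · rw [if_pos hx, snoc_sublist_snoc]
        by_cases hc : c = pc
        · rw [if_pos hc, PC_omax, PC_omin]
          rw [hH mid hm, hprev mid hm]
          constructor
          · rintro (h | ⟨-, h⟩)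
            · exact Or.inl h
            · exact Or.inr ⟨h, hx⟩
          · rintro (h | ⟨h, -⟩)
            · exact Or.inl h
            · exact Or.inr ⟨hc ▸ rfl, h⟩
        · rw [if_neg hc]
          rw [hH mid hm]
          constructor
          · rintro (h | ⟨hpc, -⟩)
            · exact h
            · exact absurd hpc.symm hc
          · exact Or.inl
      · rw [if_neg hx, List.append_nil]
        by_cases hc : c = pc
        · rw [if_pos hc, PC_omax, PC_omin]
          rw [hH mid hm]
          constructor
          · exact Or.inl
          · rintro (h | ⟨-, h⟩)
            · exact h
            · exact absurd h hx
        · rw [if_neg hc]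
          exact hH mid hm

lemma DPInv_fold (n : Int) (ps : List Char) :
    ∀ L : List (Char × Int),
      DPInv n L [] ps (L.foldl (fun q cx => updB cx.1 cx.2 (some (n + 1)) ps q) (ps.map fun _ => none)) := by
  intro L
  induction L using List.reverseRecOn with
  | nil => exact DPInv_init n ps []
  | append_singleton L e ih =>
    rw [List.foldl_append]
    simp only [List.foldl_cons, List.foldl_nil]
    obtain ⟨c, x⟩ := e
    refine DPInv_step n L c x ps _ [] (some (n + 1)) ih ?_
    intro mid hm
    simp [PC]
    omega

lemma getLastD_of_ne_nil {l : List (Option Int)} (d : Option Int) (h : l ≠ []) :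
    l.getLastD d = l.getLastD none := by
  obtain ⟨y, hy⟩ := Option.isSome_iff_exists.mp (List.getLast?_isSome.mpr h)
  rw [List.getLastD_eq_getLast?, List.getLastD_eq_getLast?, hy]
  rfl

lemma DPInv_last (n : Int) (L : List (Char × Int)) :
    ∀ (ps : List Char) (q : List (Option Int)) (pre : List Char), ps ≠ [] →
      DPInv n L pre ps q →
      q ≠ [] ∧ ∀ mid : Int, mid ≤ n →
        ((pre ++ ps).Sublist (kept mid L) ↔ PC (q.getLastD none) mid) := by
  intro ps
  induction ps with
  | nil => intro q pre h; exact absurd rfl h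
  | cons pc ps' ih =>
    intro q pre _ hInv
    cases q with
    | nil => exact absurd hInv (by simp [DPInv])
    | cons o q' =>
      obtain ⟨hH, hT⟩ := hInv
      cases ps' with
      | nil =>
        cases q' with
        | nil => exact ⟨by simp, fun mid hm => hH mid hm⟩
        | cons o2 q2 => exact absurd hT (by simp [DPInv])
      | cons pc2 ps2 =>
        obtain ⟨hq', hcond⟩ := ih q' (pre ++ [pc]) (by simp) hT
        refine ⟨by simp, ?_⟩
        intro mid hm
        rw [show pre ++ pc :: pc2 :: ps2 = (pre ++ [pc]) ++ (pc2 :: ps2) by simp]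
        rw [hcond mid hm]
        rw [show (o :: q').getLastD none = q'.getLastD o from List.getLastD_cons]
        rw [getLastD_of_ne_nil o hq']

-- ===== VERDICT (by name: the statement is the Claim_ definition above) =====
theorem solve_spec : Claim_equal_solve := by
  intro t p im n _hDom hPre
  unfold Spec_solve
  have hslice_t : PySem.List.slice t.toList none (some (max 0 n)) = t.toList.take n.toNat := by
    rw [PySem.List.slice_to _ (le_max_left 0 n)]
    congr 1
    omega
  have hslice_im : PySem.List.slice im none (some (max 0 n)) = im.take n.toNat := by
    rw [PySem.List.slice_to _ (le_max_left 0 n)]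
    congr 1
    omega
  by_cases hm : p.toList = []
  · -- empty pattern: A climbs to n (or stays -1 for n < 0), B returns max (-1) n
    have hB : solve_alt t p im n = max (-1) (n + 1 - 1) := by
      simp [solve_alt, hm]
    rw [hB]
    show solveLoop t p im n (-1) (n + 1) = max (-1) (n + 1 - 1)
    by_cases hn : 0 ≤ n
    · rw [solveLoop_eq t p im n n
        (fun mid _ h1 => iff_of_true (canDelete_empty t p im n mid hm) h1)
        (n + 2).toNat (-1) (n + 1) (by omega) (by omega) (by omega) (by omega) (by omega)]
      omega
    · rw [solveLoop, dif_neg (by omega)]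
      omega
  · -- nonempty pattern
    have hlen_t : n.toNat ≤ t.toList.length := by
      rcases hPre with h | ⟨h1, h2 | h2⟩
      · omega
      · omega
      · exact absurd (by rw [h2]; rfl) hm
    have hlen_im : n.toNat ≤ im.length := by
      rcases hPre with h | ⟨h1, _⟩ <;> omega
    set L : List (Char × Int) := (t.toList.take n.toNat).zip (im.take n.toNat) with hL
    set qf : List (Option Int) :=
      L.foldl (fun q cx => updB cx.1 cx.2 (some (n + 1)) p.toList q) (p.toList.map fun _ => none)
      with hqf
    have hinv := DPInv_fold n p.toList L
    rw [← hqf] at hinv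
    have hlast := DPInv_last n L p.toList qf [] hm hinv
    have hchar : ∀ mid : Int, mid ≤ n → (canDelete t im n mid p = true ↔ PC (qf.getLastD none) mid) := by
      intro mid hmid
      rw [canDelete_eq t p im n mid hlen_t hlen_im, decide_eq_true_eq]
      rw [← hL, gfold_spec p mid L 0 le_rfl (by exact_mod_cast Nat.zero_le _)]
      have := hlast.2 mid hmid
      simpa using this
    have hm' : ¬ p.toList.length = 0 := fun h => hm (List.length_eq_zero_iff.mp h)
    have hlen_qf : qf.length = p.toList.length := by rw [hqf, hL]; exact foldq_len n p.toList _
    have hgetD : PySem.List.pyGetD qf ((p.toList.length : Int) - 1) none = qf.getLastD none := by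
      rw [show ((p.toList.length : Int) - 1) = ((p.toList.length - 1 : Nat) : Int) by
        have : 0 < p.toList.length := by omega
        omega]
      rw [PySem.List.pyGetD_natCast]
      rw [List.getD_eq_getElem?_getD, List.getLastD_eq_getLast?, List.getLast?_eq_getElem?]
      rw [hlen_qf]
    have hB : solve_alt t p im n =
        (match qf.getLastD none with
         | none => (-1 : Int)
         | some v => max (-1) (v - 1)) := by
      simp only [solve_alt, hslice_t, hslice_im, ← hL, ← hqf, if_neg hm', hgetD]
    rw [hB]
    show solveLoop t p im n (-1) (n + 1) = _
    cases hgl : qf.getLastD none with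
    | none =>
      by_cases hn : 0 ≤ n
      · apply solveLoop_eq t p im n (-1) ?_ (n + 2).toNat (-1) (n + 1)
          (by omega) (by omega) (by omega) (by omega) (by omega)
        intro mid h0 h1
        constructor
        · intro hcd
          have := (hchar mid h1).mp hcd
          rw [hgl] at this
          exact absurd this (PC_none mid)
        · intro h
          omega
      · rw [solveLoop, dif_neg (by omega)]
    | some v =>
      have hv : v ≤ n + 1 := by
        have hmem : qf.getLastD none ∈ qf := by
          rw [List.getLastD_eq_getLast?, List.getLast?_eq_some_getLast hlast.1]
          exact List.getLast_mem hlast.1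
        have hbnd : BndOk n qf := by rw [hqf, hL]; exact foldq_bnd n p.toList _
        exact hbnd _ hmem v hgl
      by_cases hn : 0 ≤ n
      · apply solveLoop_eq t p im n (max (-1) (v - 1)) ?_ (n + 2).toNat (-1) (n + 1)
          (by omega) (by omega) (le_max_left _ _) (by omega) (by omega)
        intro mid h0 h1
        rw [hchar mid h1, hgl, PC_some]
        omega
      · rw [solveLoop, dif_neg (by omega)]
        show (-1 : Int) = max (-1) (v - 1)
        omega
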